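-- pv_equiv track=rewrite | github.com/seandonn-boston/homebase | aiStrat/monitor/sources/web_content.py | _is_allowed_domain
-- ===== SOURCE A (Python) =====
-- ALLOWED_DOMAINS = frozenset([
--     "anthropic.com",
--     "www.anthropic.com",
--     "docs.anthropic.com",
--     "openai.com",
--     "platform.openai.com",
--     "ai.google.dev",
--     "blog.google",
--     "ai.meta.com",
--     "docs.mistral.ai",
--     "mistral.ai",
--     "huggingface.co",
--     "github.blog",
--     "github.com",
--     "arxiv.org",
--     "cohere.com",
--     "docs.cohere.com",
--     "x.ai",
-- ])
--
-- def _is_allowed_domain(url: str) -> bool: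
--     """Check if a URL is on an allowed domain."""
--     try:
--         # Extract domain from URL
--         domain = url.split("://", 1)[1].split("/", 1)[0].split(":", 1)[0].lower()
--         # Check exact match or parent domain match
--         return domain in ALLOWED_DOMAINS or any(
--             domain.endswith("." + allowed) for allowed in ALLOWED_DOMAINS
--         )
--     except (IndexError, ValueError):
--         return False
-- ===== SOURCE B (Python) =====
-- ALLOWED_DOMAINS = frozenset([
--     "anthropic.com",
--     "www.anthropic.com",
--     "docs.anthropic.com",
--     "openai.com",
--     "platform.openai.com",
--     "ai.google.dev",
--     "blog.google",
--     "ai.meta.com",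
--     "docs.mistral.ai",
--     "mistral.ai",
--     "huggingface.co",
--     "github.blog",
--     "github.com",
--     "arxiv.org",
--     "cohere.com",
--     "docs.cohere.com",
--     "x.ai",
-- ])
--
--
-- def _is_allowed_domain(url: str) -> bool:
--     """Check if a URL is on an allowed domain."""
--     # Locate the scheme separator instead of splitting; no exception handling needed.
--     i = url.find("://")
--     if i == -1:
--         return False
--     # Scan the host characters one by one, stopping at the first '/' or ':',
--     # instead of two staged split() passes.
--     host = []
--     for ch in url[i + 3:]:
--         if ch == "/" or ch == ":":
--             break
--         host.append(ch)
--     s = "".join(host).lower()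
--     # Walk the domain's own dot-boundary suffixes instead of scanning the
--     # allowlist with endswith: correct because domain.endswith("." + a) holds
--     # for some allowed a exactly when some suffix cut at a dot equals a.
--     while True:
--         if s in ALLOWED_DOMAINS:
--             return True
--         dot = s.find(".")
--         if dot == -1:
--             return False
--         s = s[dot + 1:]
-- ===== Notes on version B (the rewrite author's own statement) =====
-- stated objective: alternative
-- what changed: B locates the scheme separator with str.find and extracts the host in a single character scan that stops at the first path or port delimiter (instead of A's try/except around three staged split passes), then decides membership by walking down the domain's own dot-boundary suffixes with one set lookup each (instead of A's endswith scan over the whole allowlist).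
import Mathlib
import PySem

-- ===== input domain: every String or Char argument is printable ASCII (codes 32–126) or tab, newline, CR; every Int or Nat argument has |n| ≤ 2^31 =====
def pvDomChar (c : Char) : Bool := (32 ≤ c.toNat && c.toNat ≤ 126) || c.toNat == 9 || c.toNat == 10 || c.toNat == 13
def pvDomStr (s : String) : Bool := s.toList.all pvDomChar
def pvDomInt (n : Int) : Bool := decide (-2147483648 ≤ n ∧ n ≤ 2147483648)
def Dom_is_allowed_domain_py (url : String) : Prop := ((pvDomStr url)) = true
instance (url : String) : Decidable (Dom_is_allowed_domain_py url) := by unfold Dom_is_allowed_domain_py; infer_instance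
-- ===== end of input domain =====

-- B replaces A's staged split() extraction by find("://") plus a single character scan of
-- the host, and replaces A's endswith scan over the allowlist by a walk down the domain's
-- own dot-boundary suffixes (objective: alternative).

-- the module-level frozenset ALLOWED_DOMAINS (shared by both Pythons)
def pvAllowed : PySem.Set String := PySem.Set.ofList [
  "anthropic.com", "www.anthropic.com", "docs.anthropic.com",
  "openai.com", "platform.openai.com", "ai.google.dev", "blog.google",
  "ai.meta.com", "docs.mistral.ai", "mistral.ai", "huggingface.co",
  "github.blog", "github.com", "arxiv.org", "cohere.com",
  "docs.cohere.com", "x.ai"]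

-- ===== PORT A =====
def is_allowed_domain_py (url : String) : Bool :=
  -- try: domain = url.split("://", 1)[1]… — pyGet? none = IndexError, caught: return False
  match PySem.List.pyGet? ((PySem.Str.splitMax? url "://" 1).getD []) 1 with
  | none => false
  | some r1 =>
      let d1 := ((PySem.Str.splitMax? r1 "/" 1).getD []).headD ""
      let d2 := ((PySem.Str.splitMax? d1 ":" 1).getD []).headD ""
      let domain := PySem.Str.lower d2
      PySem.Set.contains pvAllowed domain ||
        pvAllowed.any (fun allowed => PySem.Str.endswith domain ("." ++ allowed))

-- ===== PORT B =====
-- for ch in url[i+3:]: stop at the first '/' or ':', collecting the host characters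
def pvHostScan : List Char → List Char
  | [] => []
  | c :: rest => if c = '/' ∨ c = ':' then [] else c :: pvHostScan rest

-- while True: if s in ALLOWED_DOMAINS: return True; dot = s.find('.'); if dot == -1: return False; s = s[dot+1:]
def pvSuffixWalk (s : List Char) : Bool :=
  if PySem.Set.contains pvAllowed (String.ofList s) then true
  else  -- dot = s.find('.')
    if h : PySem.Chars.find s ['.'] = -1 then false
    else pvSuffixWalk (s.drop (PySem.Chars.find s ['.'] + 1).toNat)
termination_by s.length
decreasing_by
  have h0 : (0:Int) ≤ PySem.Chars.find s ['.'] := by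
    have := PySem.Chars.neg_one_le_find s ['.']
    omega
  have hinf : ['.'] <:+: s := (PySem.Chars.find_ne_neg_one_iff s ['.']).mp h
  have hne : 0 < s.length := by
    cases s with
    | nil => simp [List.infix_nil] at hinf
    | cons a t => simp
  simp only [List.length_drop]
  have h1 : (1:Nat) ≤ (PySem.Chars.find s ['.'] + 1).toNat := by omega
  omega

def is_allowed_domain_py_alt (url : String) : Bool :=
  let i := PySem.Str.find url "://"
  if i = -1 then false
  else
    let rest := PySem.Str.slice url (some (i + 3)) none
    let s := PySem.Chars.lower (pvHostScan rest.toList)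
    pvSuffixWalk s

-- ===== PRECONDITION & SPEC =====
def Spec_is_allowed_domain_py (url : String) (out : Bool) : Prop := out = is_allowed_domain_py_alt url
instance (url : String) (out : Bool) : Decidable (Spec_is_allowed_domain_py url out) := by unfold Spec_is_allowed_domain_py; infer_instance

-- ===== CLAIM (what is proved, stated in full; the proofs are below) =====
def Claim_equal_is_allowed_domain_py : Prop := ∀ (url : String), Dom_is_allowed_domain_py url → Spec_is_allowed_domain_py url (is_allowed_domain_py url)

-- ===== LEMMAS AND PROOFS =====

-- with maxsplit exhausted, go emits the rest as the last piece
theorem pvGo_zero (sep : List Char) (fuel : Nat) (l cur : List Char) (acc : List (List Char)) :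
    PySem.Chars.splitOnMax.go sep fuel 0 l cur acc = ((cur.reverse ++ l) :: acc).reverse := by
  cases fuel with
  | zero => rfl
  | succ f => cases l with
    | nil => simp [PySem.Chars.splitOnMax.go]
    | cons c rest => simp [PySem.Chars.splitOnMax.go]

-- find returns the first occurrence; this pins its value from a witness + minimality
theorem pvFind_eq_of_first (sep l : List Char) (k : Nat)
    (h1 : sep <+: l.drop k) (h2 : ∀ i < k, ¬ sep <+: l.drop i) :
    PySem.Chars.find l sep = (k : Int) := by
  have hinf : sep <:+: l := ((h1.isInfix).trans (List.drop_suffix k l).isInfix)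
  have hge : 0 ≤ PySem.Chars.find l sep := (PySem.Chars.find_nonneg_iff l sep).mpr hinf
  obtain ⟨hp, hmin⟩ := PySem.Chars.find_spec (s := l) (sub := sep) hge
  rcases Nat.lt_trichotomy (PySem.Chars.find l sep).toNat k with h | h | h
  · exact absurd hp (h2 _ h)
  · omega
  · exact absurd h1 (hmin _ h)

theorem pvFind_zero_of_prefix (sep l : List Char) (h : sep <+: l) :
    PySem.Chars.find l sep = 0 :=
  pvFind_eq_of_first sep l 0 (by simpa using h) (by omega)

theorem pvFind_cons_succ (sep : List Char) (c : Char) (rest : List Char)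
    (hc : ¬ sep <+: (c :: rest)) (hr : sep <:+: rest) :
    PySem.Chars.find (c :: rest) sep = PySem.Chars.find rest sep + 1 := by
  have hge : 0 ≤ PySem.Chars.find rest sep := (PySem.Chars.find_nonneg_iff rest sep).mpr hr
  obtain ⟨hp, hmin⟩ := PySem.Chars.find_spec (s := rest) (sub := sep) hge
  have := pvFind_eq_of_first sep (c :: rest) ((PySem.Chars.find rest sep).toNat + 1)
    (by simpa using hp)
    (by
      intro i hi
      cases i with
      | zero => simpa using hc
      | succ j => simpa using hmin j (by omega))
  omega

-- closed form of go at maxsplit = 1: split at the first occurrence of sep, if any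
theorem pvGo_one (sep : List Char) (hsep : sep ≠ []) (fuel : Nat) :
    ∀ (l cur : List Char) (acc : List (List Char)), l.length < fuel →
    PySem.Chars.splitOnMax.go sep fuel 1 l cur acc =
      if sep <:+: l
      then acc.reverse ++ [cur.reverse ++ l.take (PySem.Chars.find l sep).toNat,
                           l.drop ((PySem.Chars.find l sep).toNat + sep.length)]
      else acc.reverse ++ [cur.reverse ++ l] := by
  induction fuel with
  | zero => intro l cur acc hf; omega
  | succ f ih =>
    intro l cur acc hf
    cases l with
    | nil =>
      have : ¬ sep <:+: ([] : List Char) := by simp [List.infix_nil, hsep]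
      simp [PySem.Chars.splitOnMax.go, this]
    | cons c rest =>
      by_cases hp : sep <+: (c :: rest)
      · have hpre : sep.isPrefixOf (c :: rest) = true := List.isPrefixOf_iff_prefix.mpr hp
        have hfind : PySem.Chars.find (c :: rest) sep = 0 := pvFind_zero_of_prefix sep _ hp
        have hinf : sep <:+: (c :: rest) := hp.isInfix
        simp only [PySem.Chars.splitOnMax.go, hpre, if_true]
        rw [pvGo_zero]
        simp [hinf, hfind]
      · have hpre : sep.isPrefixOf (c :: rest) = false := by
          rw [← Bool.not_eq_true, List.isPrefixOf_iff_prefix]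
          exact hp
        have hstep : PySem.Chars.splitOnMax.go sep (f + 1) 1 (c :: rest) cur acc =
            PySem.Chars.splitOnMax.go sep f 1 rest (c :: cur) acc := by
          simp [PySem.Chars.splitOnMax.go, hpre]
        rw [hstep, ih rest (c :: cur) acc (by simpa using Nat.lt_of_succ_lt_succ hf)]
        have hiff : sep <:+: (c :: rest) ↔ sep <:+: rest := by
          rw [List.infix_cons_iff]
          simp [hp]
        by_cases hr : sep <:+: rest
        · have hge : 0 ≤ PySem.Chars.find rest sep :=
            (PySem.Chars.find_nonneg_iff rest sep).mpr hr
          have hfind := pvFind_cons_succ sep c rest hp hr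
          have htn : (PySem.Chars.find (c :: rest) sep).toNat
              = (PySem.Chars.find rest sep).toNat + 1 := by omega
          have hdrop : (c :: rest).drop ((PySem.Chars.find rest sep).toNat + 1 + sep.length)
              = rest.drop ((PySem.Chars.find rest sep).toNat + sep.length) := by
            rw [Nat.add_right_comm, List.drop_succ_cons]
          simp only [if_pos hr, if_pos (hiff.mpr hr), htn, hdrop, List.take_succ_cons,
            List.reverse_cons, List.append_assoc, List.singleton_append]
        · have : ¬ sep <:+: (c :: rest) := fun h => hr (hiff.mp h)
          simp [hr, this]

-- head of a maxsplit-1 split on a single character = takeWhile (≠ c)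
theorem pvTake_find_eq_takeWhile (c : Char) (l : List Char) :
    (if [c] <:+: l then l.take (PySem.Chars.find l [c]).toNat else l)
      = l.takeWhile (fun x => x ≠ c) := by
  induction l with
  | nil => simp [List.infix_nil]
  | cons a rest ih =>
    by_cases hac : a = c
    · subst hac
      have hp : [a] <+: (a :: rest) := by simp
      have : [a] <:+: (a :: rest) := hp.isInfix
      simp [this, pvFind_zero_of_prefix _ _ hp]
    · have hp : ¬ [c] <+: (a :: rest) := by
        simp [List.cons_prefix_cons]
        intro h; exact absurd h.symm hac
      have hiff : [c] <:+: (a :: rest) ↔ [c] <:+: rest := by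
        rw [List.infix_cons_iff]; simp [hp]
      by_cases hr : [c] <:+: rest
      · have hge : 0 ≤ PySem.Chars.find rest [c] :=
          (PySem.Chars.find_nonneg_iff rest [c]).mpr hr
        have hfind := pvFind_cons_succ [c] a rest hp hr
        have htn : (PySem.Chars.find (a :: rest) [c]).toNat
            = (PySem.Chars.find rest [c]).toNat + 1 := by omega
        rw [if_pos (hiff.mpr hr), htn, List.take_succ_cons]
        rw [if_pos hr] at ih
        simp [hac, ih]
      · have hn : ¬ [c] <:+: (a :: rest) := fun h => hr (hiff.mp h)
        rw [if_neg hn]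
        rw [if_neg hr] at ih
        rw [List.takeWhile_cons, ← ih]
        simp [hac]

-- splitOnMax at maxsplit 1 (the form both split() calls of A take)
theorem pvSplitOnMax_one (sep : List Char) (hsep : sep ≠ []) (l : List Char) :
    PySem.Chars.splitOnMax l sep 1 =
      if sep <:+: l
      then [l.take (PySem.Chars.find l sep).toNat,
            l.drop ((PySem.Chars.find l sep).toNat + sep.length)]
      else [l] := by
  unfold PySem.Chars.splitOnMax
  rw [if_neg (by omega)]
  have := pvGo_one sep hsep (l.length + 1) l [] [] (by omega)
  simpa using this

-- the first piece of x.split(c, 1) is the prefix of x before the first c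
theorem pvStage2 (sepStr : String) (c : Char) (hc : sepStr.toList = [c]) (x : String) :
    ((PySem.Str.splitMax? x sepStr 1).getD []).headD ""
      = String.ofList (x.toList.takeWhile (fun ch => ch ≠ c)) := by
  unfold PySem.Str.splitMax? PySem.Chars.splitMax?
  rw [hc]
  rw [if_neg (by simp)]
  rw [pvSplitOnMax_one [c] (by simp) x.toList]
  rw [← pvTake_find_eq_takeWhile c x.toList]
  by_cases h : [c] <:+: x.toList
  · simp [h]
  · simp [h]

-- B's character scan is the two staged takeWhiles fused into one
theorem pvHostScan_eq (l : List Char) :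
    ((l.takeWhile (fun x => x ≠ '/')).takeWhile (fun x => x ≠ ':')) = pvHostScan l := by
  induction l with
  | nil => simp [pvHostScan]
  | cons a rest ih =>
    by_cases h1 : a = '/'
    · subst h1; simp [pvHostScan, List.takeWhile_cons]
    · by_cases h2 : a = ':'
      · subst h2; simp [pvHostScan, h1]
      · simp only [ne_eq, decide_not] at ih ⊢
        simp [pvHostScan, h1, h2, ih]

-- cutting s at its FIRST dot preserves the family of dot-boundary suffixes
theorem pvDotSuffix_split (s : List Char) (hne : PySem.Chars.find s ['.'] ≠ -1) (w : List Char) :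
    ('.' :: w) <:+ s ↔
      (w = s.drop ((PySem.Chars.find s ['.']).toNat + 1) ∨
       ('.' :: w) <:+ s.drop ((PySem.Chars.find s ['.']).toNat + 1)) := by
  have hge : 0 ≤ PySem.Chars.find s ['.'] := by
    have := PySem.Chars.neg_one_le_find s ['.']
    omega
  obtain ⟨hp, hmin⟩ := PySem.Chars.find_spec (s := s) (sub := ['.']) hge
  set d := (PySem.Chars.find s ['.']).toNat with hd
  have hdrop : s.drop d = '.' :: s.drop (d + 1) := by
    obtain ⟨t, ht⟩ := hp
    have h1 : s.drop (d + 1) = t := by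
      rw [← List.drop_drop, ← ht]
      simp
    rw [h1, ← ht]
    rfl
  constructor
  · rintro ⟨p, hps⟩
    have hpd : ['.'] <+: s.drop p.length := by
      rw [← hps, List.drop_left]
      simp
    have hplen : d ≤ p.length := by
      by_contra hlt
      exact hmin p.length (by omega) hpd
    rcases Nat.eq_or_lt_of_le hplen with heq | hlt
    · left
      have : '.' :: w = s.drop d := by
        rw [heq, ← hps, List.drop_left]
      rw [hdrop] at this
      exact (List.cons.injEq _ _ _ _ ▸ this).2.symm ▸ rfl
    · right
      have h1 : '.' :: w = s.drop p.length := by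
        rw [← hps, List.drop_left]
      have h2 : s.drop p.length = (s.drop (d + 1)).drop (p.length - (d + 1)) := by
        rw [List.drop_drop]
        congr 1
        omega
      rw [h1, h2]
      exact List.drop_suffix _ _
  · rintro (rfl | hsuf)
    · rw [← hdrop]
      exact List.drop_suffix _ _
    · exact hsuf.trans (List.drop_suffix _ _)

-- B's suffix walk finds exactly: the domain itself, or a suffix starting right after a dot
theorem pvSuffixWalk_iff (s : List Char) :
    pvSuffixWalk s = true ↔
      (String.ofList s ∈ pvAllowed ∨ ∃ a ∈ pvAllowed, ('.' :: a.toList) <:+ s) := by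
  induction s using pvSuffixWalk.induct with
  | case1 s hmem =>
    rw [pvSuffixWalk, if_pos hmem]
    simp [(PySem.Set.contains_iff pvAllowed _).mp hmem]
  | case2 s hmem hdot =>
    have hnomem : ¬ String.ofList s ∈ pvAllowed := fun h =>
      hmem ((PySem.Set.contains_iff _ _).mpr h)
    have hnosuf : ¬ ∃ a ∈ pvAllowed, ('.' :: a.toList) <:+ s := by
      rintro ⟨a, -, hs⟩
      have hpre : ['.'] <+: ('.' :: a.toList) := by simp
      have : ['.'] <:+: s := hpre.isInfix.trans hs.isInfix
      exact (PySem.Chars.find_eq_neg_one_iff s ['.']).mp hdot this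
    rw [pvSuffixWalk, if_neg hmem]
    simp [hdot, hnomem, hnosuf]
  | case3 s hmem hdot ih =>
    have hd : PySem.Chars.find s ['.'] ≠ -1 := hdot
    have hn : (PySem.Chars.find s ['.'] + 1).toNat = (PySem.Chars.find s ['.']).toNat + 1 := by
      have := PySem.Chars.neg_one_le_find s ['.']
      omega
    have hnomem : ¬ String.ofList s ∈ pvAllowed := fun h =>
      hmem ((PySem.Set.contains_iff _ _).mpr h)
    rw [hn] at ih
    rw [pvSuffixWalk, if_neg hmem]
    simp only [dif_neg hdot, hn]
    rw [ih]
    constructor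
    · rintro (hm | ⟨a, ha, hs⟩)
      · right
        refine ⟨String.ofList (s.drop ((PySem.Chars.find s ['.']).toNat + 1)), hm, ?_⟩
        rw [pvDotSuffix_split s hd]
        left
        rw [String.toList_ofList]
      · right
        exact ⟨a, ha, (pvDotSuffix_split s hd _).mpr (Or.inr hs)⟩
    · rintro (hm | ⟨a, ha, hs⟩)
      · exact absurd hm hnomem
      · rcases (pvDotSuffix_split s hd _).mp hs with heq | hsuf
        · left
          rw [← heq, String.ofList_toList]
          exact ha
        · right
          exact ⟨a, ha, hsuf⟩

-- A's endswith scan over the allowlist finds the same suffixes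
theorem pvAny_endswith_iff (dm : String) :
    (pvAllowed.any (fun allowed => PySem.Str.endswith dm ("." ++ allowed))) = true ↔
      ∃ a ∈ pvAllowed, ('.' :: a.toList) <:+ dm.toList := by
  simp only [List.any_eq_true, PySem.Str.endswith_eq, PySem.Chars.endswith_iff,
    String.toList_append]
  constructor
  · rintro ⟨a, ha, hs⟩
    exact ⟨a, ha, by simpa using hs⟩
  · rintro ⟨a, ha, hs⟩
    exact ⟨a, ha, by simpa using hs⟩

-- A's indexing stage: url.split("://", 1)[1] exists iff "://" occurs, and is the tail after it
theorem pvStage1 (url : String) :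
    PySem.List.pyGet? ((PySem.Str.splitMax? url "://" 1).getD []) 1 =
      (if PySem.Chars.find url.toList "://".toList = -1 then none
       else some (String.ofList
         (url.toList.drop ((PySem.Chars.find url.toList "://".toList).toNat + 3)))) := by
  unfold PySem.Str.splitMax? PySem.Chars.splitMax?
  rw [if_neg (by decide)]
  rw [pvSplitOnMax_one _ (by decide) url.toList]
  by_cases h : "://".toList <:+: url.toList
  · rw [if_pos h, if_neg ((PySem.Chars.find_ne_neg_one_iff _ _).mpr h)]
    simp [PySem.List.pyGet?, PySem.List.pyIdx?]
  · rw [if_neg h, if_pos ((PySem.Chars.find_eq_neg_one_iff _ _).mpr h)]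
    simp [PySem.List.pyGet?, PySem.List.pyIdx?]

theorem pvSepLit : ("://" : String).toList = [':', '/', '/'] := by decide

theorem pvLowerOfList (l : List Char) :
    PySem.Str.lower (String.ofList l) = String.ofList (PySem.Chars.lower l) := by
  have h := PySem.Str.toList_lower (String.ofList l)
  rw [String.toList_ofList] at h
  rw [← h, String.ofList_toList]

-- exact match ∨ endswith-scan  =  B's suffix walk, for any domain string
theorem pvFinal (dm : String) :
    (PySem.Set.contains pvAllowed dm ||
       pvAllowed.any (fun allowed => PySem.Str.endswith dm ("." ++ allowed)))
      = pvSuffixWalk dm.toList := by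
  rw [Bool.eq_iff_iff, Bool.or_eq_true]
  rw [pvSuffixWalk_iff, pvAny_endswith_iff, PySem.Set.contains_iff, String.ofList_toList]

-- ===== VERDICT (by name: the statement is the Claim_ definition above) =====
theorem is_allowed_domain_py_spec : Claim_equal_is_allowed_domain_py := by
  intro url _
  unfold Spec_is_allowed_domain_py
  have hc1 : ("/" : String).toList = ['/'] := by decide
  have hc2 : (":" : String).toList = [':'] := by decide
  by_cases hfind : PySem.Chars.find url.toList [':', '/', '/'] = -1
  · simp [is_allowed_domain_py, is_allowed_domain_py_alt, pvStage1, hfind]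
  · have hge : 0 ≤ PySem.Chars.find url.toList [':', '/', '/'] := by
      have := PySem.Chars.neg_one_le_find url.toList [':', '/', '/']
      omega
    have htn : (PySem.Chars.find url.toList [':', '/', '/'] + 3).toNat
        = (PySem.Chars.find url.toList [':', '/', '/']).toNat + 3 := by omega
    simp only [is_allowed_domain_py, is_allowed_domain_py_alt, PySem.Str.find_eq, pvStage1,
      pvSepLit, hfind, if_false]
    rw [pvStage2 "/" '/' hc1, String.toList_ofList, pvStage2 ":" ':' hc2, String.toList_ofList,
      pvHostScan_eq]
    simp only [PySem.Str.toList_slice, PySem.Chars.slice_eq_listSlice,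
      PySem.List.slice_from _ (by omega : (0:Int) ≤ PySem.Chars.find url.toList [':', '/', '/'] + 3),
      htn]
    rw [pvLowerOfList]
    have hL : PySem.Chars.lower (pvHostScan
        (url.toList.drop ((PySem.Chars.find url.toList [':', '/', '/']).toNat + 3)))
        = (String.ofList (PySem.Chars.lower (pvHostScan
            (url.toList.drop ((PySem.Chars.find url.toList [':', '/', '/']).toNat + 3))))).toList :=
      String.toList_ofList.symm
    conv_rhs => rw [hL]
    exact pvFinal _
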